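-- pv_equiv track=rewrite | github.com/g121370451/ruc-ov-eval | DeepRead/parser_pdf.py | _extract_html_table
-- ===== SOURCE A (Python) =====
-- from typing import List, Dict, Any, Optional, Tuple
--
-- def _extract_html_table(lines: List[str], start_idx: int) -> Tuple[str, int]:
--     """Extract a full <table>...</table> block starting at start_idx. Returns (block, next_index)."""
--     buf = []
--     i = start_idx
--     first_line = lines[i]
--     buf.append(first_line)
--
--     if "</table>" in first_line.lower():
--         return "\n".join(buf), i + 1
--
--     i += 1
--     while i < len(lines):
--         buf.append(lines[i])
--         if "</table>" in lines[i].lower():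
--             i += 1
--             break
--         i += 1
--     return "\n".join(buf), i
-- ===== SOURCE B (Python) =====
-- def _extract_html_table(lines, start_idx):
--     """Extract a full <table>...</table> block starting at start_idx. Returns (block, next_index)."""
--     n = len(lines)
--     start = start_idx if start_idx >= 0 else start_idx + n
--     if not (0 <= start < n):
--         raise IndexError("list index out of range")
--     end = next((j for j in range(start, n) if "</table>" in lines[j].lower()), None)
--     if end is None:
--         return "\n".join(lines[start:]), n
--     return "\n".join(lines[start:end + 1]), end + 1
-- ===== Notes on version B (the rewrite author's own statement) =====
-- stated objective: idiomatic
-- what changed: B replaces A's incremental buffer-appending while-loop with a locate-the-closing-tag scan followed by a single slice-and-join, and normalises a negative start index once instead of indexing with wraparound throughout.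
-- intended difference: On in-range negative start_idx A mixes Python's wraparound indexing with a 0-based loop bound, so it returns a next_index <= 0 or re-appends already-consumed lines after the index crosses 0; B treats the position as the equivalent non-negative index and returns the intended block and next index. — e.g. on _extract_html_table(["<table>", "</table>"], -2): A returns ("<table>\n</table>", 0), B returns ("<table>\n</table>", 2)
import Mathlib
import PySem

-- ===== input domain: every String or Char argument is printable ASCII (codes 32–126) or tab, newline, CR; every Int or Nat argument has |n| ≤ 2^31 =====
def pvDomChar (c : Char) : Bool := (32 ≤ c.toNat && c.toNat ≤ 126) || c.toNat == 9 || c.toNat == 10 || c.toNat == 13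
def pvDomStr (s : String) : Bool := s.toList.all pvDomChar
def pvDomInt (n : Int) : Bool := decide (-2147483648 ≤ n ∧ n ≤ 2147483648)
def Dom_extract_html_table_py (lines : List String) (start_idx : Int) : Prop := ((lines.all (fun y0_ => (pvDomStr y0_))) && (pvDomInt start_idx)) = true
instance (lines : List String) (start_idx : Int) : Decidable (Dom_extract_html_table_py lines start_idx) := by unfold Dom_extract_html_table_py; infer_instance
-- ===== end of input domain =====

-- B differs from A only on in-range negative start_idx (see D_ below); elsewhere it returns
-- the same (block, next_index) by locating the closing tag and slicing instead of appending.

-- ===== PORT A =====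
-- '"</table>" in s.lower()'
def pvHasTag (s : String) : Bool := PySem.Str.isIn "</table>" (PySem.Str.lower s)

-- the 'while i < len(lines)' loop of A, carrying (buf, i); lines[i] via pyGetD (in range on every
-- reached i); structural recursion on fuel = number of remaining iterations (len - i)
def pvALoopF (lines : List String) (fuel : Nat) (i : Int) (buf : List String) : List String × Int :=
  match fuel with
  | 0 => (buf, i)
  | fuel' + 1 =>
    if i < (lines.length : Int) then
      let line := PySem.List.pyGetD lines i ""
      if pvHasTag line then (buf ++ [line], i + 1)
      else pvALoopF lines fuel' (i + 1) (buf ++ [line])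
    else (buf, i)

def pvALoop (lines : List String) (i : Int) (buf : List String) : List String × Int :=
  pvALoopF lines ((lines.length : Int) - i).toNat i buf

def extract_html_table_py (lines : List String) (start_idx : Int) : String × Int :=
  match PySem.List.pyGet? lines start_idx with
  | none => ("", 0)  -- IndexError on lines[start_idx]; excluded by Pre_
  | some first_line =>
    if pvHasTag first_line then (PySem.Str.join "\n" [first_line], start_idx + 1)
    else
      let r := pvALoop lines (start_idx + 1) [first_line]
      (PySem.Str.join "\n" r.1, r.2)

-- ===== PORT B =====
-- 'next((j for j in range(start, n) if "</table>" in lines[j].lower()), None)'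
def pvFindEndF (lines : List String) (fuel : Nat) (j : Int) : Option Int :=
  match fuel with
  | 0 => none
  | fuel' + 1 =>
    if j < (lines.length : Int) then
      if pvHasTag (PySem.List.pyGetD lines j "") then some j
      else pvFindEndF lines fuel' (j + 1)
    else none

def pvFindEnd (lines : List String) (j : Int) : Option Int :=
  pvFindEndF lines ((lines.length : Int) - j).toNat j

def extract_html_table_py_alt (lines : List String) (start_idx : Int) : String × Int :=
  let n : Int := lines.length
  let start : Int := if start_idx ≥ 0 then start_idx else start_idx + n
  if 0 ≤ start ∧ start < n then
    match pvFindEnd lines start with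
    | none => (PySem.Str.join "\n" (PySem.List.slice lines (some start) none), n)
    | some e => (PySem.Str.join "\n" (PySem.List.slice lines (some start) (some (e + 1))), e + 1)
  else ("", 0)  -- raise IndexError; excluded by Pre_

-- ===== PRECONDITION & SPEC =====
-- Pre_: exactly the inputs where A's lines[start_idx] does not raise IndexError
def Pre_extract_html_table_py (lines : List String) (start_idx : Int) : Prop :=
  -(lines.length : Int) ≤ start_idx ∧ start_idx < (lines.length : Int)
instance (lines : List String) (start_idx : Int) : Decidable (Pre_extract_html_table_py lines start_idx) := by unfold Pre_extract_html_table_py; infer_instance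
def pvWitness_extract_html_table_py : List String × Int := (["<table>", "</table>"], 0)

-- On in-range negative start_idx A mixes Python's wraparound indexing with a 0-based loop bound, so it
-- returns a next_index ≤ 0 or re-appends already-consumed lines after the index crosses 0; B treats the
-- position as the equivalent non-negative index and returns the intended block and next index.
def D_extract_html_table_py (lines : List String) (start_idx : Int) : Prop :=
  -(lines.length : Int) ≤ start_idx ∧ start_idx < 0
instance (lines : List String) (start_idx : Int) : Decidable (D_extract_html_table_py lines start_idx) := by unfold D_extract_html_table_py; infer_instance

def Spec_extract_html_table_py (lines : List String) (start_idx : Int) (out : String × Int) : Prop := ¬ D_extract_html_table_py lines start_idx → out = extract_html_table_py_alt lines start_idx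
instance (lines : List String) (start_idx : Int) (out : String × Int) : Decidable (Spec_extract_html_table_py lines start_idx out) := by unfold Spec_extract_html_table_py; infer_instance

def pvDiffWitness_extract_html_table_py : List String × Int := (["<table>", "</table>"], -2)
def pvDiffWitnessOut_extract_html_table_py : (String × Int) × (String × Int) :=
  (("<table>\n</table>", 0), ("<table>\n</table>", 2))

-- ===== CLAIM (what is proved, stated in full; the proofs are below) =====
def Claim_unchanged_extract_html_table_py : Prop := ∀ (lines : List String) (start_idx : Int), Dom_extract_html_table_py lines start_idx → Pre_extract_html_table_py lines start_idx → Spec_extract_html_table_py lines start_idx (extract_html_table_py lines start_idx)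
def Claim_changed_extract_html_table_py : Prop := Dom_extract_html_table_py (pvDiffWitness_extract_html_table_py.1) (pvDiffWitness_extract_html_table_py.2) ∧ Pre_extract_html_table_py (pvDiffWitness_extract_html_table_py.1) (pvDiffWitness_extract_html_table_py.2) ∧ D_extract_html_table_py (pvDiffWitness_extract_html_table_py.1) (pvDiffWitness_extract_html_table_py.2) ∧ extract_html_table_py (pvDiffWitness_extract_html_table_py.1) (pvDiffWitness_extract_html_table_py.2) = pvDiffWitnessOut_extract_html_table_py.1 ∧ extract_html_table_py_alt (pvDiffWitness_extract_html_table_py.1) (pvDiffWitness_extract_html_table_py.2) = pvDiffWitnessOut_extract_html_table_py.2 ∧ pvDiffWitnessOut_extract_html_table_py.1 ≠ pvDiffWitnessOut_extract_html_table_py.2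
def Claim_exact_extract_html_table_py : Prop := ∀ (lines : List String) (start_idx : Int), Dom_extract_html_table_py lines start_idx → Pre_extract_html_table_py lines start_idx → D_extract_html_table_py lines start_idx → extract_html_table_py lines start_idx ≠ extract_html_table_py_alt lines start_idx

-- ===== LEMMAS AND PROOFS =====

-- one unfolding step of the B-side scan
theorem pvFindEnd_step (lines : List String) (j : Int) :
    pvFindEnd lines j =
      if j < (lines.length : Int) then
        if pvHasTag (PySem.List.pyGetD lines j "") then some j else pvFindEnd lines (j + 1)
      else none := by
  by_cases h : j < (lines.length : Int)
  · have hf : ((lines.length : Int) - j).toNat = ((lines.length : Int) - (j + 1)).toNat + 1 := by omega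
    simp only [pvFindEnd, hf, pvFindEndF, if_pos h]
  · cases hf : ((lines.length : Int) - j).toNat <;> simp [pvFindEnd, pvFindEndF, hf, h]

-- one unfolding step of A's while-loop
theorem pvALoop_step (lines : List String) (i : Int) (buf : List String) :
    pvALoop lines i buf =
      if i < (lines.length : Int) then
        if pvHasTag (PySem.List.pyGetD lines i "") then (buf ++ [PySem.List.pyGetD lines i ""], i + 1)
        else pvALoop lines (i + 1) (buf ++ [PySem.List.pyGetD lines i ""])
      else (buf, i) := by
  by_cases h : i < (lines.length : Int)
  · have hf : ((lines.length : Int) - i).toNat = ((lines.length : Int) - (i + 1)).toNat + 1 := by omega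
    simp only [pvALoop, hf, pvALoopF, if_pos h]
  · cases hf : ((lines.length : Int) - i).toNat <;> simp [pvALoop, pvALoopF, hf, h]

-- lines[i] for a non-negative in-range Int index, through pyGetD
theorem pvGetD_nonneg (lines : List String) (j : Nat) (hj : j < lines.length) :
    PySem.List.pyGetD lines (j : Int) "" = lines[j] := by
  simp [PySem.List.pyGetD, List.getElem?_eq_getElem hj]

-- lines[i] for an in-range negative Int index (Python wraparound), through pyGetD
theorem pvGetD_neg (lines : List String) (m : Nat) (hm : m < lines.length) :
    PySem.List.pyGetD lines ((m : Int) - (lines.length : Int)) "" = lines[m] := by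
  have hk : ((m : Int) - (lines.length : Int)) = -((lines.length - m : Nat) : Int) := by
    push_cast [Nat.cast_sub (le_of_lt hm)]; ring
  rw [hk]
  simp [PySem.List.pyGetD, PySem.List.pyGet?_neg_natCast lines (lines.length - m) (by omega) (by omega),
    Nat.sub_sub_self (le_of_lt hm), List.getElem?_eq_getElem hm]

theorem pvFindEndF_spec (lines : List String) (f : Nat) (j e : Int) (h : pvFindEndF lines f j = some e) :
    j ≤ e ∧ e < (lines.length : Int) ∧ pvHasTag (PySem.List.pyGetD lines e "") = true := by
  induction f generalizing j with
  | zero => simp [pvFindEndF] at h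
  | succ f ih =>
    simp only [pvFindEndF] at h
    by_cases hlt : j < (lines.length : Int)
    · rw [if_pos hlt] at h
      by_cases ht : pvHasTag (PySem.List.pyGetD lines j "") = true
      · rw [if_pos ht] at h
        obtain rfl : j = e := by simpa using h
        exact ⟨le_refl _, hlt, ht⟩
      · rw [if_neg ht] at h
        obtain ⟨h1, h2, h3⟩ := ih (j + 1) h
        exact ⟨by omega, h2, h3⟩
    · rw [if_neg hlt] at h; simp at h

theorem pvFindEnd_spec (lines : List String) (j e : Int) (h : pvFindEnd lines j = some e) :
    j ≤ e ∧ e < (lines.length : Int) ∧ pvHasTag (PySem.List.pyGetD lines e "") = true :=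
  pvFindEndF_spec lines _ j e h

theorem pvFindEndF_none (lines : List String) (f : Nat) (j : Int)
    (hf : ((lines.length : Int) - j).toNat ≤ f) (h : pvFindEndF lines f j = none)
    (k : Int) (hk1 : j ≤ k) (hk2 : k < (lines.length : Int)) :
    pvHasTag (PySem.List.pyGetD lines k "") = false := by
  induction f generalizing j with
  | zero => omega
  | succ f ih =>
    simp only [pvFindEndF] at h
    have hlt : j < (lines.length : Int) := by omega
    rw [if_pos hlt] at h
    by_cases ht : pvHasTag (PySem.List.pyGetD lines j "") = true
    · rw [if_pos ht] at h; simp at h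
    · rw [if_neg ht] at h
      by_cases hkj : k = j
      · subst hkj; simpa using ht
      · exact ih (j + 1) (by omega) h (by omega)

theorem pvFindEnd_none (lines : List String) (j : Int) (h : pvFindEnd lines j = none)
    (k : Int) (hk1 : j ≤ k) (hk2 : k < (lines.length : Int)) :
    pvHasTag (PySem.List.pyGetD lines k "") = false :=
  pvFindEndF_none lines _ j (le_refl _) h k hk1 hk2

-- a slice starting at an in-range j with a later bound peels off lines[j]
theorem pvSlice_cons (lines : List String) (j : Nat) (hj : j < lines.length) (b : Int) (hb : (j : Int) < b) :
    PySem.List.slice lines (some (j : Int)) (some b) =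
      lines[j] :: PySem.List.slice lines (some ((j : Int) + 1)) (some b) := by
  have h1 : ((j : Int) + 1) = ((j + 1 : Nat) : Int) := by push_cast; ring
  have e1 := PySem.List.slice_toNat lines (a := (j : Int)) (b := b) (by omega) (by omega)
  have e2 := PySem.List.slice_toNat lines (a := ((j + 1 : Nat) : Int)) (b := b) (by omega) (by omega)
  rw [h1, e1, e2]
  simp only [Int.toNat_natCast]
  have h2 : b.toNat - j = (b.toNat - (j + 1)) + 1 := by omega
  rw [h2, List.drop_eq_getElem_cons hj, List.take_succ_cons]

-- the empty slice xs[a:a]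
theorem pvSlice_self (lines : List String) (j : Nat) :
    PySem.List.slice lines (some ((j : Int) + 1)) (some ((j : Int) + 1)) = [] := by
  have h1 : ((j : Int) + 1) = ((j + 1 : Nat) : Int) := by push_cast; ring
  rw [h1, PySem.List.slice_natCast]; simp

-- A's loop from a non-negative index equals B's find-then-slice
theorem pvALoop_eq (lines : List String) (j : Nat) (hj : j ≤ lines.length) (buf : List String) :
    pvALoop lines (j : Int) buf =
      match pvFindEnd lines (j : Int) with
      | some e => (buf ++ PySem.List.slice lines (some (j : Int)) (some (e + 1)), e + 1)
      | none => (buf ++ lines.drop j, (lines.length : Int)) := by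
  obtain ⟨d, hd⟩ : ∃ d, lines.length - j = d := ⟨_, rfl⟩
  induction d generalizing j buf with
  | zero =>
    have hjl : j = lines.length := by omega
    subst hjl
    rw [pvALoop_step, pvFindEnd_step]
    simp
  | succ d ih =>
    have hjl : j < lines.length := by omega
    have hc : (j : Int) < (lines.length : Int) := by exact_mod_cast hjl
    rw [pvALoop_step, pvFindEnd_step, if_pos hc, if_pos hc]
    simp only [pvGetD_nonneg lines j hjl]
    by_cases ht : pvHasTag lines[j] = true
    · rw [if_pos ht, if_pos ht]
      simp [pvSlice_cons lines j hjl ((j : Int) + 1) (by omega), pvSlice_self lines j]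
    · rw [if_neg ht, if_neg ht]
      have h1 : ((j : Int) + 1) = ((j + 1 : Nat) : Int) := by push_cast; ring
      rw [h1, ih (j + 1) (by omega) (buf ++ [lines[j]]) (by omega)]
      cases he : pvFindEnd lines ((j + 1 : Nat) : Int) with
      | none =>
        rw [List.drop_eq_getElem_cons hjl]
        simp
      | some e =>
        obtain ⟨he1, he2, he3⟩ := pvFindEnd_spec lines _ e he
        have hcns : PySem.List.slice lines (some (j : Int)) (some (e + 1)) =
            lines[j] :: PySem.List.slice lines (some ((j : Int) + 1)) (some (e + 1)) := by
          rw [pvSlice_cons lines j hjl (e + 1) (by push_cast at he1 ⊢; omega)]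
        rw [h1] at hcns
        simp [hcns]

-- A's loop from an in-range negative index: tag found in the tail (shifted next_index) or wrap to 0
theorem pvALoop_neg (lines : List String) (m : Nat) (hm : m ≤ lines.length) (buf : List String) :
    pvALoop lines ((m : Int) - (lines.length : Int)) buf =
      match pvFindEnd lines (m : Int) with
      | some e => (buf ++ PySem.List.slice lines (some (m : Int)) (some (e + 1)), e + 1 - (lines.length : Int))
      | none => pvALoop lines 0 (buf ++ lines.drop m) := by
  obtain ⟨d, hd⟩ : ∃ d, lines.length - m = d := ⟨_, rfl⟩
  induction d generalizing m buf with
  | zero =>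
    have hjl : m = lines.length := by omega
    subst hjl
    rw [pvFindEnd_step]
    simp
  | succ d ih =>
    have hjl : m < lines.length := by omega
    have hc1 : (m : Int) - (lines.length : Int) < (lines.length : Int) := by omega
    have hc2 : (m : Int) < (lines.length : Int) := by exact_mod_cast hjl
    rw [pvALoop_step, pvFindEnd_step, if_pos hc1, if_pos hc2]
    simp only [pvGetD_neg lines m hjl, pvGetD_nonneg lines m hjl]
    by_cases ht : pvHasTag lines[m] = true
    · rw [if_pos ht, if_pos ht]
      have harith : (m : Int) - (lines.length : Int) + 1 = (m : Int) + 1 - (lines.length : Int) := by ring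
      simp [pvSlice_cons lines m hjl ((m : Int) + 1) (by omega), pvSlice_self lines m, harith]
    · rw [if_neg ht, if_neg ht]
      have h2 : (m : Int) - (lines.length : Int) + 1 = ((m + 1 : Nat) : Int) - (lines.length : Int) := by
        push_cast; ring
      have h1 : ((m : Int) + 1) = ((m + 1 : Nat) : Int) := by push_cast; ring
      rw [h2, ih (m + 1) (by omega) (buf ++ [lines[m]]) (by omega), h1]
      cases he : pvFindEnd lines ((m + 1 : Nat) : Int) with
      | none =>
        rw [List.drop_eq_getElem_cons hjl]
        simp
      | some e =>
        obtain ⟨he1, he2, he3⟩ := pvFindEnd_spec lines _ e he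
        have hcns : PySem.List.slice lines (some (m : Int)) (some (e + 1)) =
            lines[m] :: PySem.List.slice lines (some ((m : Int) + 1)) (some (e + 1)) := by
          rw [pvSlice_cons lines m hjl (e + 1) (by push_cast at he1 ⊢; omega)]
        rw [h1] at hcns
        simp [hcns]

-- lines[i] (pyGet?) for an in-range negative Int index
theorem pvGet?_neg (lines : List String) (m : Nat) (hm : m < lines.length) :
    PySem.List.pyGet? lines ((m : Int) - (lines.length : Int)) = some lines[m] := by
  have hk : ((m : Int) - (lines.length : Int)) = -((lines.length - m : Nat) : Int) := by
    push_cast [Nat.cast_sub (le_of_lt hm)]; ring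
  rw [hk, PySem.List.pyGet?_neg_natCast lines (lines.length - m) (by omega) (by omega)]
  simp [Nat.sub_sub_self (le_of_lt hm), List.getElem?_eq_getElem hm]

-- joining a strictly longer list with a non-empty separator gives a strictly longer string
theorem pvJoin_append_length_lt (sep : List Char) (hsep : sep ≠ []) (xs ys : List (List Char))
    (hx : xs ≠ []) (hy : ys ≠ []) :
    (PySem.Chars.join sep xs).length < (PySem.Chars.join sep (xs ++ ys)).length := by
  induction xs with
  | nil => exact absurd rfl hx
  | cons a xs ih =>
    cases xs with
    | nil =>
      cases ys with
      | nil => exact absurd rfl hy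
      | cons y ys =>
        rw [PySem.Chars.join_singleton]
        simp only [List.singleton_append, PySem.Chars.join_cons_cons]
        have : 0 < sep.length := List.length_pos_iff.mpr hsep
        simp [List.length_append]; omega
    | cons b xs' =>
      have h1 := ih (by simp)
      rw [PySem.Chars.join_cons_cons]
      have h2 : (a :: b :: xs') ++ ys = a :: b :: (xs' ++ ys) := by simp
      rw [h2, PySem.Chars.join_cons_cons]
      have h3 : (b :: xs') ++ ys = b :: (xs' ++ ys) := by simp
      rw [h3] at h1
      simp only [List.length_append]; omega

-- joined strings of those two lists differ
theorem pvJoin_append_ne (xs ys : List String) (hx : xs ≠ []) (hy : ys ≠ []) :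
    PySem.Str.join "\n" (xs ++ ys) ≠ PySem.Str.join "\n" xs := by
  intro h
  have h2 := congrArg (fun s => s.toList.length) h
  simp only [PySem.Str.toList_join, List.map_append] at h2
  have h3 := pvJoin_append_length_lt "\n".toList (by decide) (xs.map String.toList)
    (ys.map String.toList) (by simpa using hx) (by simpa using hy)
  omega

-- ===== VERDICT (by name: the statement is the Claim_ definition above) =====
theorem extract_html_table_py_spec : Claim_unchanged_extract_html_table_py := by
  intro lines start_idx _hdom hpre
  unfold Spec_extract_html_table_py
  intro hnd
  obtain ⟨hp1, hp2⟩ := hpre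
  have hs0 : (0 : Int) ≤ start_idx := by
    by_contra hneg
    exact hnd ⟨hp1, by omega⟩
  obtain ⟨j, rfl⟩ := Int.eq_ofNat_of_zero_le hs0
  have hjl : j < lines.length := by exact_mod_cast hp2
  unfold extract_html_table_py extract_html_table_py_alt
  rw [PySem.List.pyGet?_eq_some_getElem lines hs0 hp2]
  simp only [Int.toNat_natCast]
  rw [if_pos (show ((j : Int)) ≥ 0 from by omega),
    if_pos (show (0 : Int) ≤ (j : Int) ∧ (j : Int) < (lines.length : Int) from ⟨hs0, hp2⟩)]
  rw [pvFindEnd_step, if_pos hp2, pvGetD_nonneg lines j hjl]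
  by_cases ht : pvHasTag lines[j] = true
  · rw [if_pos ht, if_pos ht]
    simp [pvSlice_cons lines j hjl ((j : Int) + 1) (by omega), pvSlice_self lines j]
  · rw [if_neg ht, if_neg ht]
    have h1 : ((j : Int) + 1) = ((j + 1 : Nat) : Int) := by push_cast; ring
    rw [h1, pvALoop_eq lines (j + 1) (by omega) [lines[j]]]
    cases he : pvFindEnd lines ((j + 1 : Nat) : Int) with
    | none =>
      rw [PySem.List.slice_from_natCast, List.drop_eq_getElem_cons hjl]
      simp
    | some e =>
      obtain ⟨he1, he2, he3⟩ := pvFindEnd_spec lines _ e he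
      have hcns : PySem.List.slice lines (some (j : Int)) (some (e + 1)) =
          lines[j] :: PySem.List.slice lines (some ((j : Int) + 1)) (some (e + 1)) := by
        rw [pvSlice_cons lines j hjl (e + 1) (by push_cast at he1 ⊢; omega)]
      rw [h1] at hcns
      simp [hcns]

theorem extract_html_table_py_changed : Claim_changed_extract_html_table_py := by
  unfold Claim_changed_extract_html_table_py; decide

theorem extract_html_table_py_tight : Claim_exact_extract_html_table_py := by
  intro lines start_idx _hdom hpre hd
  obtain ⟨hd1, hd2⟩ := hd
  have hn1 : 1 ≤ lines.length := by omega
  obtain ⟨m, hsm, hml⟩ : ∃ m : Nat, start_idx = (m : Int) - (lines.length : Int) ∧ m < lines.length :=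
    ⟨(start_idx + lines.length).toNat, by omega, by omega⟩
  subst hsm
  simp only [extract_html_table_py, extract_html_table_py_alt]
  simp only [pvGet?_neg lines m hml]
  have hnotge : ¬ ((m : Int) - (lines.length : Int) ≥ 0) := by omega
  have hstart : (m : Int) - (lines.length : Int) + (lines.length : Int) = (m : Int) := by ring
  rw [if_neg hnotge, hstart]
  rw [if_pos (show (0 : Int) ≤ (m : Int) ∧ (m : Int) < (lines.length : Int) from ⟨by omega, by exact_mod_cast hml⟩)]
  rw [pvFindEnd_step, if_pos (show (m : Int) < (lines.length : Int) from by exact_mod_cast hml),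
    pvGetD_nonneg lines m hml]
  by_cases ht : pvHasTag lines[m] = true
  · rw [if_pos ht, if_pos ht]
    intro heq
    have hsnd : (m : Int) - (lines.length : Int) + 1 = (m : Int) + 1 := congrArg Prod.snd heq
    omega
  · rw [if_neg ht, if_neg ht]
    have h2 : (m : Int) - (lines.length : Int) + 1 = ((m + 1 : Nat) : Int) - (lines.length : Int) := by
      push_cast; ring
    have h1 : ((m : Int) + 1) = ((m + 1 : Nat) : Int) := by push_cast; ring
    rw [h2, pvALoop_neg lines (m + 1) (by omega) [lines[m]], h1]
    cases he : pvFindEnd lines ((m + 1 : Nat) : Int) with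
    | some e =>
      intro heq
      have hsnd : e + 1 - (lines.length : Int) = e + 1 := congrArg Prod.snd heq
      omega
    | none =>
      have hz : pvALoop lines 0 ([lines[m]] ++ List.drop (m + 1) lines) =
          pvALoop lines ((0 : Nat) : Int) (lines[m] :: List.drop (m + 1) lines) := by norm_num
      rw [hz, pvALoop_eq lines 0 (by omega) (lines[m] :: List.drop (m + 1) lines)]
      have hnone_m : ∀ k : Int, (m : Int) ≤ k → k < (lines.length : Int) →
          pvHasTag (PySem.List.pyGetD lines k "") = false := by
        intro k hk1 hk2
        by_cases hkm : k = (m : Int)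
        · subst hkm
          rw [pvGetD_nonneg lines m hml]
          simpa using ht
        · have hfe : pvFindEnd lines ((m : Int) + 1) = none := by rw [h1]; exact he
          exact pvFindEnd_none lines ((m : Int) + 1) hfe k (by omega) hk2
      cases h0 : pvFindEnd lines ((0 : Nat) : Int) with
      | some e =>
        obtain ⟨he1, he2, he3⟩ := pvFindEnd_spec lines _ e h0
        have hem : e < (m : Int) := by
          by_contra hge
          have := hnone_m e (by omega) he2
          rw [this] at he3
          exact Bool.false_ne_true he3
        intro heq
        have hsnd : e + 1 = (lines.length : Int) := congrArg Prod.snd heq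
        omega
      | none =>
        rw [PySem.List.slice_from_natCast]
        intro heq
        have hfst : PySem.Str.join "\n" ((lines[m] :: List.drop (m + 1) lines) ++ List.drop 0 lines) =
            PySem.Str.join "\n" (List.drop m lines) := congrArg Prod.fst heq
        rw [List.drop_zero] at hfst
        have hdm : lines[m] :: List.drop (m + 1) lines = List.drop m lines :=
          (List.drop_eq_getElem_cons hml).symm
        rw [hdm] at hfst
        exact pvJoin_append_ne (List.drop m lines) lines
          (by
            intro hnil
            have := congrArg List.length hnil
            simp at this
            omega)
          (by
            intro hnil
            rw [hnil] at hn1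
            simp at hn1) hfst
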